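-- pv_equiv track=rewrite | github.com/Marty14/TESI-Martina | CODICECONTEMPI.py | create_run_decomposition
-- ===== SOURCE A (Python) =====
-- def create_run_decomposition(sequence):
--     run_decomposition = []
--     if not sequence:
--         return run_decomposition
--
--     UNKNOWN = 0
--     ASCENDING = 1
--     DESCENDING = 2
--     direction = UNKNOWN
--
--     current_run = [sequence[0]]
--
--     for i in range(1, len(sequence)):
--         current_elem = sequence[i]
--         prev_elem = sequence[i - 1]
--
--         if current_elem != prev_elem:
--             if direction == UNKNOWN:
--                 direction = ASCENDING if current_elem > prev_elem else DESCENDING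
--             elif (direction == ASCENDING and current_elem < prev_elem) or (direction == DESCENDING and current_elem > prev_elem):
--                 if direction == DESCENDING:
--                     current_run.reverse()
--                 run_decomposition.append(current_run)
--                 current_run = []
--                 direction = UNKNOWN
--
--         current_run.append(current_elem)
--
--         if i == len(sequence) - 1:
--             if direction == DESCENDING:
--                 current_run.reverse()
--             run_decomposition.append(current_run)
--
--     return run_decomposition
-- ===== SOURCE B (Python) =====
-- def create_run_decomposition(sequence):
--     # Two-pass: first record (start, end, direction) segments, then slice.
--     n = len(sequence)
--     if n == 0:
--         return []
--     segs = []
--     start = 0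
--     direction = 0  # 0 unknown, 1 ascending, 2 descending
--     for i in range(1, n):
--         if sequence[i] != sequence[i - 1]:
--             d = 1 if sequence[i] > sequence[i - 1] else 2
--             if direction == 0:
--                 direction = d
--             elif direction != d:
--                 segs.append((start, i, direction))
--                 start = i
--                 direction = 0
--     segs.append((start, n, direction))
--     out = []
--     for s, e, d in segs:
--         seg = sequence[s:e]
--         if d == 2:
--             seg.reverse()
--         out.append(seg)
--     return out
-- ===== Notes on version B (the rewrite author's own statement) =====
-- stated objective: alternative
-- what changed: Replaces the interleaved run-building loop (which mutates, reverses and appends the current run inside the scan) by a two-pass scheme: one scan records only (start,end,direction) boundary segments, then the output is built by slicing the input per segment and reversing descending slices.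
-- intended difference: On singleton lists A's loop body never runs so A returns an empty decomposition losing the element, while B returns the one-element run [[x]], the intended value. — e.g. on create_run_decomposition([5]): A returns [], B returns [[5]]
import Mathlib
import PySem

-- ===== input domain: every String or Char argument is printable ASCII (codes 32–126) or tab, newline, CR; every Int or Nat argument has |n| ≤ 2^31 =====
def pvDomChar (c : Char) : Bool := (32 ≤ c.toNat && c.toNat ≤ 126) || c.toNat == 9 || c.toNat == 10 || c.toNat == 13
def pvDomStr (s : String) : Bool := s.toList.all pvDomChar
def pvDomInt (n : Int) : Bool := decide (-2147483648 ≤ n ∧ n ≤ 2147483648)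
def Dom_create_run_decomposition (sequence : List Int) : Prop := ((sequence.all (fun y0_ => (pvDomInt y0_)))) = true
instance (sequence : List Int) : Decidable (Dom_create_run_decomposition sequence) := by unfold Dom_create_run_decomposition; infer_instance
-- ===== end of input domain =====

-- B replaces A's interleaved run-building loop by a two-pass scheme (one scan recording
-- (start,end,direction) segments, then slicing); objective: alternative decomposition.

-- ===== PORT A =====
-- the part of A's loop body before the trailing `if i == len(sequence) - 1`:
-- state = (run_decomposition, direction, current_run)
def pvABody (sequence : List Int) (st : List (List Int) × Int × List Int) (i : Int) :
    List (List Int) × Int × List Int :=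
  let acc := st.1
  let dir := st.2.1
  let run := st.2.2
  let cur := PySem.List.pyGetD sequence i 0
  let prev := PySem.List.pyGetD sequence (i - 1) 0
  let st1 :=
    if cur ≠ prev then
      if dir = 0 then (acc, (if cur > prev then (1 : Int) else 2), run)
      else if (dir = 1 ∧ cur < prev) ∨ (dir = 2 ∧ cur > prev) then
        (acc ++ [if dir = 2 then run.reverse else run], (0 : Int), ([] : List Int))
      else (acc, dir, run)
    else (acc, dir, run)
  (st1.1, st1.2.1, st1.2.2 ++ [cur])

-- full loop body, including the final-iteration append
def pvAStep (sequence : List Int) (st : List (List Int) × Int × List Int) (i : Int) :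
    List (List Int) × Int × List Int :=
  let st1 := pvABody sequence st i
  if i = (sequence.length : Int) - 1 then
    (st1.1 ++ [if st1.2.1 = 2 then st1.2.2.reverse else st1.2.2], st1.2.1, st1.2.2)
  else st1

def create_run_decomposition (sequence : List Int) : List (List Int) :=
  match sequence with
  | [] => []
  | x :: _ =>
    ((PySem.List.pyRange 1 (sequence.length : Int) 1).foldl (pvAStep sequence) ([], 0, [x])).1

-- ===== PORT B =====
-- first pass: one iteration of the boundary scan; state = (segs, start, direction)
def pvBStep (sequence : List Int) (st : List (Int × Int × Int) × Int × Int) (i : Int) :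
    List (Int × Int × Int) × Int × Int :=
  let segs := st.1
  let start := st.2.1
  let dir := st.2.2
  let cur := PySem.List.pyGetD sequence i 0
  let prev := PySem.List.pyGetD sequence (i - 1) 0
  if cur ≠ prev then
    let d : Int := if cur > prev then 1 else 2
    if dir = 0 then (segs, start, d)
    else if dir ≠ d then (segs ++ [(start, i, dir)], i, 0)
    else st
  else st

-- second pass: render one segment as a slice (reversed if descending)
def pvRenderSeg (sequence : List Int) (seg : Int × Int × Int) : List Int :=
  let sl := PySem.List.slice sequence (some seg.1) (some seg.2.1)
  if seg.2.2 = 2 then sl.reverse else sl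

def create_run_decomposition_alt (sequence : List Int) : List (List Int) :=
  if sequence.length = 0 then []
  else
    let n : Int := (sequence.length : Int)
    let st := (PySem.List.pyRange 1 n 1).foldl (pvBStep sequence) ([], 0, 0)
    (st.1 ++ [(st.2.1, n, st.2.2)]).map (pvRenderSeg sequence)

-- ===== PRECONDITION & SPEC =====
-- On singleton lists A's loop body never runs, so A returns an empty decomposition, losing the element;
-- B returns the one-element run, the intended value.
def D_create_run_decomposition (sequence : List Int) : Prop := sequence.length = 1
instance (sequence : List Int) : Decidable (D_create_run_decomposition sequence) := by
  unfold D_create_run_decomposition; infer_instance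

def Spec_create_run_decomposition (sequence : List Int) (out : List (List Int)) : Prop :=
  ¬ D_create_run_decomposition sequence → out = create_run_decomposition_alt sequence
instance (sequence : List Int) (out : List (List Int)) : Decidable (Spec_create_run_decomposition sequence out) := by
  unfold Spec_create_run_decomposition; infer_instance

def pvDiffWitness_create_run_decomposition : List Int := [5]
def pvDiffWitnessOut_create_run_decomposition : (List (List Int)) × (List (List Int)) := ([], [[5]])

-- ===== CLAIM =====
def Claim_unchanged_create_run_decomposition : Prop := ∀ (sequence : List Int), Dom_create_run_decomposition sequence → Spec_create_run_decomposition sequence (create_run_decomposition sequence)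
def Claim_changed_create_run_decomposition : Prop := Dom_create_run_decomposition (pvDiffWitness_create_run_decomposition) ∧ D_create_run_decomposition (pvDiffWitness_create_run_decomposition) ∧ create_run_decomposition (pvDiffWitness_create_run_decomposition) = pvDiffWitnessOut_create_run_decomposition.1 ∧ create_run_decomposition_alt (pvDiffWitness_create_run_decomposition) = pvDiffWitnessOut_create_run_decomposition.2 ∧ pvDiffWitnessOut_create_run_decomposition.1 ≠ pvDiffWitnessOut_create_run_decomposition.2
def Claim_exact_create_run_decomposition : Prop := ∀ (sequence : List Int), Dom_create_run_decomposition sequence → D_create_run_decomposition sequence → create_run_decomposition sequence ≠ create_run_decomposition_alt sequence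

-- ===== LEMMAS AND PROOFS =====

-- slices grow one element at a time
theorem pv_slice_snoc (seq : List Int) (s j : Nat) (hs : s ≤ j) (hj : j < seq.length) :
    PySem.List.slice seq (some (s : Int)) (some ((j : Int) + 1))
      = PySem.List.slice seq (some (s : Int)) (some (j : Int))
        ++ [PySem.List.pyGetD seq (j : Int) 0] := by
  have h1 : ((j : Int) + 1) = ((j + 1 : Nat) : Int) := by push_cast; ring
  rw [h1, PySem.List.slice_natCast, PySem.List.slice_natCast, PySem.List.pyGetD_natCast]
  have h2 : j + 1 - s = (j - s) + 1 := by omega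
  rw [h2, List.take_add_one]
  congr 1
  have h3 : (seq.drop s)[j - s]? = seq[j]? := by
    rw [List.getElem?_drop]; congr 1; omega
  rw [h3, List.getElem?_eq_getElem hj]
  simp [List.getD, List.getElem?_eq_getElem hj]

theorem pv_slice_nil (seq : List Int) (j : Nat) :
    PySem.List.slice seq (some (j : Int)) (some (j : Int)) = [] := by
  rw [PySem.List.slice_natCast]; simp

-- the loop-body relation: one A-iteration on a related state matches one B-iteration
theorem pv_step (seq : List Int) (j s : Nat) (dir : Int) (segs : List (Int × Int × Int))
    (hs : s < j) (hj : j < seq.length) (hdir : dir = 0 ∨ dir = 1 ∨ dir = 2) :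
    ∃ (s' : Nat) (dir' : Int) (segs' : List (Int × Int × Int)),
      pvBStep seq (segs, (s : Int), dir) (j : Int) = (segs', (s' : Int), dir') ∧
      s' < j + 1 ∧ (dir' = 0 ∨ dir' = 1 ∨ dir' = 2) ∧
      pvABody seq (segs.map (pvRenderSeg seq), dir,
          PySem.List.slice seq (some (s : Int)) (some (j : Int))) (j : Int)
        = (segs'.map (pvRenderSeg seq), dir',
           PySem.List.slice seq (some (s' : Int)) (some ((j : Int) + 1))) := by
  have hsn : PySem.List.slice seq (some (s : Int)) (some ((j : Int) + 1))
      = PySem.List.slice seq (some (s : Int)) (some (j : Int))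
        ++ [PySem.List.pyGetD seq (j : Int) 0] := pv_slice_snoc seq s j (le_of_lt hs) hj
  have hjn : PySem.List.slice seq (some (j : Int)) (some ((j : Int) + 1))
      = [PySem.List.pyGetD seq (j : Int) 0] := by
    rw [pv_slice_snoc seq j j le_rfl hj, pv_slice_nil, List.nil_append]
  by_cases hne : PySem.List.pyGetD seq (j : Int) 0 = PySem.List.pyGetD seq ((j : Int) - 1) 0
  · refine ⟨s, dir, segs, ?_, by omega, hdir, ?_⟩
    · simp only [pvBStep]
      rw [if_neg (not_not_intro hne)]
    · simp only [pvABody]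
      rw [if_neg (not_not_intro hne), hsn]
  · by_cases h0 : dir = 0
    · refine ⟨s, (if PySem.List.pyGetD seq (j : Int) 0 > PySem.List.pyGetD seq ((j : Int) - 1) 0
          then (1 : Int) else 2), segs, ?_, by omega, ?_, ?_⟩
      · simp only [pvBStep]
        rw [if_pos hne, if_pos h0]
      · split <;> simp
      · simp only [pvABody]
        rw [if_pos hne, if_pos h0, hsn]
    · have hd12 : dir = 1 ∨ dir = 2 := by rcases hdir with h | h | h <;> simp_all
      by_cases hbrk : (dir = 1 ∧ PySem.List.pyGetD seq (j : Int) 0 < PySem.List.pyGetD seq ((j : Int) - 1) 0)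
          ∨ (dir = 2 ∧ PySem.List.pyGetD seq (j : Int) 0 > PySem.List.pyGetD seq ((j : Int) - 1) 0)
      · -- run boundary: A closes the current run, B records the segment
        refine ⟨j, 0, segs ++ [((s : Int), (j : Int), dir)], ?_, by omega, by left; rfl, ?_⟩
        · have hdne : dir ≠ (if PySem.List.pyGetD seq (j : Int) 0 > PySem.List.pyGetD seq ((j : Int) - 1) 0
              then (1 : Int) else 2) := by
            rcases hbrk with ⟨h1, h2⟩ | ⟨h1, h2⟩
            · rw [if_neg (not_lt_of_gt h2)]; omega
            · rw [if_pos h2]; omega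
          simp only [pvBStep]
          rw [if_pos hne, if_neg h0, if_pos hdne]
        · simp only [pvABody]
          rw [if_pos hne, if_neg h0, if_pos hbrk, hjn]
          simp only [List.map_append, List.map_cons, List.map_nil]
          rfl
      · -- same direction continues
        have hdeq : dir = (if PySem.List.pyGetD seq (j : Int) 0 > PySem.List.pyGetD seq ((j : Int) - 1) 0
            then (1 : Int) else 2) := by
          rcases hd12 with h | h
          · subst h
            have hnlt : ¬ PySem.List.pyGetD seq (j : Int) 0 < PySem.List.pyGetD seq ((j : Int) - 1) 0 :=
              fun hc => hbrk (Or.inl ⟨rfl, hc⟩)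
            have hgt : PySem.List.pyGetD seq (j : Int) 0 > PySem.List.pyGetD seq ((j : Int) - 1) 0 :=
              lt_of_le_of_ne (not_lt.mp hnlt) (Ne.symm hne)
            rw [if_pos hgt]
          · subst h
            have hngt : ¬ PySem.List.pyGetD seq (j : Int) 0 > PySem.List.pyGetD seq ((j : Int) - 1) 0 :=
              fun hc => hbrk (Or.inr ⟨rfl, hc⟩)
            rw [if_neg hngt]
        refine ⟨s, dir, segs, ?_, by omega, hdir, ?_⟩
        · simp only [pvBStep]
          rw [if_pos hne, if_neg h0, if_neg (not_not_intro hdeq)]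
        · simp only [pvABody]
          rw [if_pos hne, if_neg h0, if_neg hbrk, hsn]

-- main invariant: from any related mid-loop state, the remaining A-iterations produce
-- exactly the rendered B segments (with the final segment closed at n)
theorem pv_inv (seq : List Int) :
    ∀ (k j : Nat) (segs : List (Int × Int × Int)) (s : Nat) (dir : Int),
      seq.length - j = k → 1 ≤ j → j < seq.length → s < j →
      (dir = 0 ∨ dir = 1 ∨ dir = 2) →
      ((PySem.List.pyRange (j : Int) (seq.length : Int) 1).foldl (pvAStep seq)
          (segs.map (pvRenderSeg seq), dir,
           PySem.List.slice seq (some (s : Int)) (some (j : Int)))).1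
        = (let st := (PySem.List.pyRange (j : Int) (seq.length : Int) 1).foldl
              (pvBStep seq) (segs, (s : Int), dir)
           (st.1 ++ [(st.2.1, (seq.length : Int), st.2.2)]).map (pvRenderSeg seq)) := by
  intro k
  induction k with
  | zero => intro j segs s dir hk h1 hjn; omega
  | succ k ih =>
    intro j segs s dir hk h1 hjn hs hdir
    have hcast : ((j : Int) < (seq.length : Int)) := by exact_mod_cast hjn
    rw [PySem.List.pyRange_one_cons hcast]
    simp only [List.foldl_cons]
    obtain ⟨s', dir', segs', hB, hs', hdir', hA⟩ := pv_step seq j s dir segs hs hjn hdir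
    by_cases hlast : j + 1 = seq.length
    · -- final iteration
      have hrange : PySem.List.pyRange ((j : Int) + 1) (seq.length : Int) 1 = [] := by
        apply PySem.List.pyRange_one_eq_nil; omega
      have hi : (j : Int) = (seq.length : Int) - 1 := by omega
      rw [hrange]
      simp only [List.foldl_nil, pvAStep, hA, hB]
      rw [if_pos hi]
      have hn : ((j : Int) + 1) = (seq.length : Int) := by omega
      simp only [List.map_append, List.map_cons, List.map_nil, pvRenderSeg, hn]
    · have hi : (j : Int) ≠ (seq.length : Int) - 1 := by omega
      simp only [pvAStep, hA, hB, if_neg hi]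
      have hj1 : ((j : Int) + 1) = ((j + 1 : Nat) : Int) := by push_cast; ring
      rw [hj1]
      exact ih (j + 1) segs' s' dir' (by omega) (by omega) (by omega) hs' hdir'

-- ===== VERDICT =====
theorem create_run_decomposition_spec : Claim_unchanged_create_run_decomposition := by
  intro seq _ hD
  match seq with
  | [] => rfl
  | [x] => exact absurd rfl hD
  | x :: y :: t =>
    show create_run_decomposition (x :: y :: t) = create_run_decomposition_alt (x :: y :: t)
    unfold create_run_decomposition create_run_decomposition_alt
    rw [if_neg (by simp : ¬ (x :: y :: t).length = 0)]
    have h0 : PySem.List.slice (x :: y :: t) (some (0 : Int)) (some (1 : Int))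
        = [x] := by
      simp [PySem.List.slice_to]
    have hmain := pv_inv (x :: y :: t) ((x :: y :: t).length - 1) 1 [] 0 0 rfl (by omega)
      (by simp) (by omega) (by left; rfl)
    simp only [Nat.cast_one, Nat.cast_zero, List.map_nil] at hmain
    rw [h0] at hmain
    exact hmain

theorem create_run_decomposition_changed : Claim_changed_create_run_decomposition := by
  unfold Claim_changed_create_run_decomposition; decide

theorem create_run_decomposition_tight : Claim_exact_create_run_decomposition := by
  intro seq _ hD
  unfold D_create_run_decomposition at hD
  match seq with
  | [x] =>
    unfold create_run_decomposition create_run_decomposition_alt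
    simp [PySem.List.pyRange_one_eq_nil, pvRenderSeg]
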